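-- pv_equiv track=rewrite | github.com/T-Python-16-Feb-26/LAB_FUNCTIONS_101 | PatternFunctionBonus.py | pattern_function
-- ===== SOURCE A (Python) =====
-- def pattern_function(num):
--     """this function will return  the desired pattern of numbers as a string"""
--     EndPattern=""
--     for i in range(num,0,-1):
--         j=i
--         while j>0:
--             EndPattern+=str(j)+" "
--             j-=1
--         EndPattern+="\n"
--     return EndPattern
-- ===== SOURCE B (Python) =====
-- def pattern_function(num):
--     """this function will return  the desired pattern of numbers as a string"""
--     lines = []
--     acc = ""
--     for v in range(1, num + 1):
--         acc = str(v) + " " + acc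
--         lines.append(acc)
--     return "".join(line + "\n" for line in reversed(lines))
-- ===== Notes on version B (the rewrite author's own statement) =====
-- stated objective: faster
-- what changed: Each line is built once by prepending the new number to the previous line (no inner loop rescanning i..1), and the output is assembled by joining the collected lines in reverse.
import Mathlib
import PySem

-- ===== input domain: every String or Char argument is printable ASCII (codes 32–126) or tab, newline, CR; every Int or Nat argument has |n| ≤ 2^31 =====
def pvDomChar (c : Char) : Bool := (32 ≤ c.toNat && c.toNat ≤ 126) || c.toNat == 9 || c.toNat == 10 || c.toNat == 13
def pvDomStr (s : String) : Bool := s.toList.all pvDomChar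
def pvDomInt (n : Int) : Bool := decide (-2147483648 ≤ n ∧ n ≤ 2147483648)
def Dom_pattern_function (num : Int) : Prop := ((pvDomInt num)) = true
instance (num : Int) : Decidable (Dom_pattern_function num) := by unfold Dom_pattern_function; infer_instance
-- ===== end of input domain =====

-- B builds each line once by prepending the new number to the previous line and joins the
-- collected lines in reverse, instead of A's inner loop that rescans i..1 for every line.

-- ===== PORT A =====
-- inner 'while j > 0' loop of A
def pyWhileA (j : Int) (s : String) : String :=
  if _h : 0 < j then pyWhileA (j - 1) (s ++ PySem.Int.toStr j ++ " ") else s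
termination_by j.toNat
decreasing_by omega

def pattern_function (num : Int) : String :=
  (PySem.List.pyRange num 0 (-1)).foldl (fun s i => pyWhileA i s ++ "\n") ""

-- ===== PORT B =====
def pattern_function_alt (num : Int) : String :=
  let st := (PySem.List.pyRange 1 (num + 1) 1).foldl
    (fun (p : String × List String) v =>
      let acc := PySem.Int.toStr v ++ " " ++ p.1
      (acc, p.2 ++ [acc])) ("", [])
  (st.2.reverse.map (fun l => l ++ "\n")).foldl (· ++ ·) ""

-- ===== PRECONDITION & SPEC =====
def Spec_pattern_function (num : Int) (out : String) : Prop := out = pattern_function_alt num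
instance (num : Int) (out : String) : Decidable (Spec_pattern_function num out) := by unfold Spec_pattern_function; infer_instance

-- ===== CLAIM (what is proved, stated in full; the proofs are below) =====
def Claim_equal_pattern_function : Prop := ∀ (num : Int), Dom_pattern_function num → Spec_pattern_function num (pattern_function num)

-- ===== LEMMAS AND PROOFS =====
-- the line "n n-1 ... 1 "
def descLine : Nat → String
  | 0 => ""
  | n + 1 => PySem.Int.toStr ((n : Int) + 1) ++ " " ++ descLine n

-- the whole pattern for n
def pat : Nat → String
  | 0 => ""
  | n + 1 => (descLine (n + 1) ++ "\n") ++ pat n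

-- the list of lines B collects, in insertion order
def linesList : Nat → List String
  | 0 => []
  | n + 1 => linesList n ++ [descLine (n + 1)]

theorem pyWhileA_nat (n : Nat) : ∀ s, pyWhileA (n : Int) s = s ++ descLine n := by
  induction n with
  | zero => intro s; rw [pyWhileA]; simp [descLine]
  | succ k ih =>
      intro s
      rw [pyWhileA]
      have h : (0 : Int) < ((k + 1 : Nat) : Int) := by push_cast; omega
      rw [dif_pos h]
      have hc : ((k + 1 : Nat) : Int) - 1 = (k : Int) := by push_cast; omega
      rw [hc, ih]
      simp [descLine, String.append_assoc]

theorem foldA (n : Nat) : ∀ s,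
    (PySem.List.pyRange (n : Int) 0 (-1)).foldl (fun s i => pyWhileA i s ++ "\n") s
      = s ++ pat n := by
  induction n with
  | zero => intro s; rw [PySem.List.pyRange_neg_one_eq_nil (by simp)]; simp [pat]
  | succ k ih =>
      intro s
      rw [PySem.List.pyRange_neg_one_cons (by push_cast; omega)]
      simp only [List.foldl_cons]
      have hc : ((k + 1 : Nat) : Int) - 1 = (k : Int) := by push_cast; omega
      rw [hc, ih, pyWhileA_nat]
      simp [pat, String.append_assoc]

theorem foldB (n : Nat) :
    (PySem.List.pyRange 1 ((n : Int) + 1) 1).foldl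
      (fun (p : String × List String) v =>
        let acc := PySem.Int.toStr v ++ " " ++ p.1
        (acc, p.2 ++ [acc])) ("", [])
      = (descLine n, linesList n) := by
  induction n with
  | zero => rw [PySem.List.pyRange_one_eq_nil (by simp)]; simp [descLine, linesList]
  | succ k ih =>
      have h : PySem.List.pyRange 1 (((k + 1 : Nat) : Int) + 1) 1
          = PySem.List.pyRange 1 ((k : Int) + 1) 1 ++ [(k : Int) + 1] := by
        push_cast
        exact PySem.List.pyRange_one_succ_right (by omega)
      rw [h, List.foldl_append, ih]
      simp [descLine, linesList]

theorem join_shift (l : List String) : ∀ s, l.foldl (· ++ ·) s = s ++ l.foldl (· ++ ·) "" := by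
  induction l with
  | nil => intro s; simp
  | cons a t ih =>
      intro s
      simp only [List.foldl_cons]
      rw [ih (s ++ a), ih ("" ++ a)]
      simp [String.append_assoc]

theorem joinB (n : Nat) :
    ((linesList n).reverse.map (fun l => l ++ "\n")).foldl (· ++ ·) "" = pat n := by
  induction n with
  | zero => simp [linesList, pat]
  | succ k ih =>
      simp only [linesList, List.reverse_append, List.reverse_singleton, List.map_append,
        List.map_cons, List.map_nil, List.foldl_append, List.foldl_cons, List.foldl_nil]
      rw [join_shift, ih]
      simp [pat]

-- ===== VERDICT (by name: the statement is the Claim_ definition above) =====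
theorem pattern_function_spec : Claim_equal_pattern_function := by
  intro num _
  unfold Spec_pattern_function pattern_function pattern_function_alt
  by_cases h : num ≤ 0
  · rw [PySem.List.pyRange_neg_one_eq_nil h, PySem.List.pyRange_one_eq_nil (by omega)]
    simp
  · have hn : num = ((num.toNat : Nat) : Int) := by omega
    rw [hn, foldA, foldB, joinB]
    simp
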